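-- pv_equiv track=rewrite | github.com/matraket/doc-spec-pipeline | skills/doc-spec-generator/scripts/lib_parser.py | join_head_parts
-- ===== SOURCE A (Python) =====
-- def join_head_parts(parts: list[str]) -> str:
--     """
--     Une partes de un head-*.md con separadores ---, limpiando
--     separadores duplicados que puedan existir al final de cada parte.
--     """
--     cleaned = []
--     for part in parts:
--         # eliminar --- y líneas vacías del final de cada parte
--         lines = part.rstrip().split('\n')
--         while lines and lines[-1].strip() in ('', '---'):
--             lines.pop()
--         if lines:
--             cleaned.append('\n'.join(lines))
--     return '\n\n---\n\n'.join(cleaned) + '\n'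
-- ===== SOURCE B (Python) =====
-- def join_head_parts(parts: list[str]) -> str:
--     """
--     Une partes de un head-*.md con separadores ---, limpiando
--     separadores duplicados que puedan existir al final de cada parte.
--     """
--     cleaned = []
--     for part in parts:
--         s = part.rstrip()
--         # trim trailing blank or '---' lines by scanning indices backwards,
--         # without building a line list
--         i = len(s)
--         while i > 0:
--             k = i
--             while k > 0 and s[k - 1] != '\n':
--                 k -= 1
--             if s[k:i].strip() not in ('', '---'):
--                 break
--             i = k - 1 if k > 0 else 0
--         if i > 0:
--             cleaned.append(s[:i])
--     return '\n\n---\n\n'.join(cleaned) + '\n'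
-- ===== Notes on version B (the rewrite author's own statement) =====
-- stated objective: alternative
-- what changed: Replaces A's split-into-a-line-list + while/pop trimming with a backwards two-index character scan on the string itself (no line list is built; the kept prefix is returned by one slice).
import Mathlib
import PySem

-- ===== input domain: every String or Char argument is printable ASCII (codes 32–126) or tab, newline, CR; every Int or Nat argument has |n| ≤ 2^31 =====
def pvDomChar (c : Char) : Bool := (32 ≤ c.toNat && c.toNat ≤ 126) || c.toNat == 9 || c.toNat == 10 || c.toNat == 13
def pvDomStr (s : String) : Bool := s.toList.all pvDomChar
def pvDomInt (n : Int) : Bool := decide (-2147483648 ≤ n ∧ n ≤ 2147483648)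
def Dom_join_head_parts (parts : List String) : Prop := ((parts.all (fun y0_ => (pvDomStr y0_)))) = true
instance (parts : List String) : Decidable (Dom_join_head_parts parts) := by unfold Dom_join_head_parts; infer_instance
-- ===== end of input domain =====

-- B replaces A's split-into-a-line-list + while/pop trimming by a backwards two-index
-- character scan on the string itself (objective: alternative, same cost).

-- ===== PORT A =====
-- while lines and lines[-1].strip() in ('', '---'): lines.pop()
def popLines (ls : List (List Char)) : List (List Char) :=
  match h : ls.getLast? with
  | none => ls
  | some l =>
    let t := PySem.Chars.strip l
    if t = [] ∨ t = ['-', '-', '-'] then popLines ls.dropLast else ls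
termination_by ls.length
decreasing_by
  cases ls with
  | nil => simp at h
  | cons x xs => simp [List.length_dropLast]

def join_head_parts (parts : List String) : String :=
  let cleaned : List (List Char) := parts.foldl (fun acc part =>
    let lines := PySem.Chars.splitOn (PySem.Chars.rstrip part.toList) ['\n']
    let lines := popLines lines
    if lines ≠ [] then acc ++ [PySem.Chars.join ['\n'] lines] else acc) []
  String.mk (PySem.Chars.join "\n\n---\n\n".toList cleaned ++ ['\n'])

-- ===== PORT B =====
-- inner scan: while k > 0 and s[k-1] != '\n': k -= 1
def lineStart (s : List Char) : Nat → Nat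
  | 0 => 0
  | k + 1 => if s.getD k ' ' ≠ '\n' then lineStart s k else k + 1

theorem lineStart_le (s : List Char) (k : Nat) : lineStart s k ≤ k := by
  induction k with
  | zero => simp [lineStart]
  | succ k ih => simp only [lineStart]; split <;> omega

-- outer scan: while i > 0: … i = k - 1 if k > 0 else 0  (Nat subtraction covers both)
def cleanIdx (s : List Char) : Nat → Nat
  | 0 => 0
  | i + 1 =>
    let k := lineStart s (i + 1)
    let line := PySem.List.slice s (some (k : Int)) (some ((i + 1 : Nat) : Int))
    let t := PySem.Chars.strip line
    if t = [] ∨ t = ['-', '-', '-'] then cleanIdx s (k - 1) else i + 1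
termination_by i => i
decreasing_by
  have := lineStart_le s (i + 1); omega

def join_head_parts_alt (parts : List String) : String :=
  let cleaned : List (List Char) := parts.foldl (fun acc part =>
    let s := PySem.Chars.rstrip part.toList
    let i := cleanIdx s s.length
    if 0 < i then acc ++ [PySem.List.slice s none (some (i : Int))] else acc) []
  String.mk (PySem.Chars.join "\n\n---\n\n".toList cleaned ++ ['\n'])

-- ===== PRECONDITION & SPEC =====
def Spec_join_head_parts (parts : List String) (out : String) : Prop := out = join_head_parts_alt parts
instance (parts : List String) (out : String) : Decidable (Spec_join_head_parts parts out) := by unfold Spec_join_head_parts; infer_instance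

-- ===== CLAIM (what is proved, stated in full; the proofs are below) =====
def Claim_equal_join_head_parts : Prop := ∀ (parts : List String), Dom_join_head_parts parts → Spec_join_head_parts parts (join_head_parts parts)

-- ===== LEMMAS AND PROOFS =====

-- simple structural characterisation of Python's split('\n')
def splitC (c : Char) : List Char → List (List Char)
  | [] => [[]]
  | x :: xs => if x = c then [] :: splitC c xs else (splitC c xs).modifyHead (x :: ·)

theorem splitC_ne_nil (c : Char) (s : List Char) : splitC c s ≠ [] := by
  induction s with
  | nil => simp [splitC]
  | cons x xs ih =>
    simp only [splitC]
    split
    · simp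
    · cases h : splitC c xs with
      | nil => exact absurd h ih
      | cons a t => simp [List.modifyHead]

theorem splitOn_go_spec (c : Char) (l : List Char) (fuel : Nat) (cur : List Char)
    (acc : List (List Char)) (hf : l.length ≤ fuel) :
    PySem.Chars.splitOn.go [c] fuel l cur acc
      = acc.reverse ++ (splitC c l).modifyHead (cur.reverse ++ ·) := by
  induction l generalizing fuel cur acc with
  | nil =>
    cases fuel <;> simp [PySem.Chars.splitOn.go, splitC, List.modifyHead]
  | cons x xs ih =>
    cases fuel with
    | zero => simp at hf
    | succ f =>
      rw [PySem.Chars.splitOn.go]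
      simp only [splitC]
      by_cases hx : x = c
      · subst hx
        have hp : List.isPrefixOf [x] (x :: xs) = true := by simp [List.isPrefixOf]
        rw [hp, if_pos rfl]
        simp only [List.length_cons, List.length_nil, Nat.zero_add, List.drop_succ_cons,
          List.drop_zero]
        rw [ih f [] (cur.reverse :: acc) (by simp at hf; omega)]
        cases h : splitC x xs with
        | nil => exact absurd h (splitC_ne_nil x xs)
        | cons a t => simp [List.modifyHead]
      · have hp : List.isPrefixOf [c] (x :: xs) = false := by
          simp [List.isPrefixOf]
          exact fun h => absurd h.symm hx
        rw [hp, if_neg (by simp)]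
        rw [ih f (x :: cur) acc (by simp at hf; omega)]
        rw [if_neg hx]
        cases h : splitC c xs with
        | nil => exact absurd h (splitC_ne_nil c xs)
        | cons a t => simp [List.modifyHead]

theorem splitOn_char (c : Char) (s : List Char) :
    PySem.Chars.splitOn s [c] = splitC c s := by
  rw [PySem.Chars.splitOn, splitOn_go_spec c s (s.length + 1) [] [] (by omega)]
  cases h : splitC c s with
  | nil => exact absurd h (splitC_ne_nil c s)
  | cons a t => simp [List.modifyHead]

theorem splitC_no_sep (c : Char) (b : List Char) (h : c ∉ b) : splitC c b = [b] := by
  induction b with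
  | nil => simp [splitC]
  | cons x xs ih =>
    simp at h
    simp [splitC, ih h.2, List.modifyHead]
    intro e; exact absurd e.symm h.1

theorem splitC_append_last (c : Char) (a b : List Char) (h : c ∉ b) :
    splitC c (a ++ c :: b) = splitC c a ++ [b] := by
  induction a with
  | nil => simp [splitC, splitC_no_sep c b h]
  | cons x xs ih =>
    simp only [List.cons_append, splitC, ih]
    split
    · rfl
    · cases hx : splitC c xs with
      | nil => exact absurd hx (splitC_ne_nil c xs)
      | cons p t => simp [List.modifyHead]

theorem intercalate_cons_ne_nil (c : Char) (a : List Char) (t : List (List Char)) (ht : t ≠ []) :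
    [c].intercalate (a :: t) = a ++ c :: [c].intercalate t := by
  cases t with
  | nil => exact absurd rfl ht
  | cons b t' => simp [List.intercalate, List.intersperse]

theorem intercalate_splitC (c : Char) (s : List Char) :
    [c].intercalate (splitC c s) = s := by
  induction s with
  | nil => simp [splitC, List.intercalate]
  | cons x xs ih =>
    simp only [splitC]
    split
    · rename_i hx
      subst hx
      rw [intercalate_cons_ne_nil x [] (splitC x xs) (splitC_ne_nil x xs), ih]
      rfl
    · cases h : splitC c xs with
      | nil => exact absurd h (splitC_ne_nil c xs)
      | cons a t =>
        rw [h] at ih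
        cases t with
        | nil =>
          simp [List.intercalate] at ih ⊢
          simpa [List.modifyHead] using congrArg (x :: ·) ih
        | cons b t' =>
          rw [List.modifyHead, intercalate_cons_ne_nil c (x :: a) (b :: t') (by simp)]
          rw [intercalate_cons_ne_nil c a (b :: t') (by simp)] at ih
          rw [← ih]
          simp

-- lineStart facts
theorem lineStart_no_nl (s : List Char) (k : Nat) :
    ∀ j, lineStart s k ≤ j → j < k → s.getD j ' ' ≠ '\n' := by
  induction k with
  | zero => omega
  | succ k ih =>
    intro j h1 h2
    simp only [lineStart] at h1
    split at h1
    · rcases Nat.lt_or_ge j k with h | h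
      · exact ih j h1 h
      · have : j = k := by omega
        subst this; assumption
    · omega

theorem lineStart_prev_nl (s : List Char) (k : Nat) (h : lineStart s k ≠ 0) :
    s.getD (lineStart s k - 1) ' ' = '\n' := by
  induction k with
  | zero => simp [lineStart] at h
  | succ k ih =>
    simp only [lineStart] at h ⊢
    split at h
    · rw [if_pos (by assumption)]; exact ih h
    · rw [if_neg (by assumption)]
      simp
      rename_i hc
      simpa using hc

theorem lineStart_append (s r : List Char) (k : Nat) (hk : k ≤ s.length) :
    lineStart (s ++ r) k = lineStart s k := by
  induction k with
  | zero => rfl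
  | succ k ih =>
    have hgd : (s ++ r).getD k ' ' = s.getD k ' ' := by
      simp [List.getD, List.getElem?_append_left (by omega : k < s.length)]
    simp only [lineStart, hgd, ih (by omega)]

-- cleanIdx facts
theorem cleanIdx_le (s : List Char) (i : Nat) : cleanIdx s i ≤ i := by
  induction i using Nat.strong_induction_on with
  | _ i ih =>
    cases i with
    | zero => simp [cleanIdx]
    | succ m =>
      rw [cleanIdx]
      split
      · have h1 := lineStart_le s (m + 1)
        have h2 := ih (lineStart s (m + 1) - 1) (by omega)
        omega
      · omega

theorem cleanIdx_prefix (t r : List Char) (i : Nat) (hi : i ≤ t.length) :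
    cleanIdx (t ++ r) i = cleanIdx t i := by
  induction i using Nat.strong_induction_on with
  | _ i ih =>
    cases i with
    | zero => simp [cleanIdx]
    | succ m =>
      have hl := lineStart_le t (m + 1)
      have hls := lineStart_append t r (m + 1) hi
      have hlin : PySem.List.slice (t ++ r) (some ((lineStart t (m + 1) : Nat) : Int))
            (some ((m + 1 : Nat) : Int))
          = PySem.List.slice t (some ((lineStart t (m + 1) : Nat) : Int))
            (some ((m + 1 : Nat) : Int)) := by
        rw [PySem.List.slice_natCast, PySem.List.slice_natCast,
          List.drop_append_of_le_length (by omega),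
          List.take_append_of_le_length (by simp [List.length_drop]; omega)]
      rw [cleanIdx, cleanIdx, hls, hlin]
      split
      · exact ih (lineStart t (m + 1) - 1) (by omega) (by omega)
      · rfl

-- popLines facts
theorem popLines_nil : popLines [] = [] := by
  rw [popLines]
  split
  · rfl
  · rename_i l h
    simp at h

theorem popLines_concat (xs : List (List Char)) (b : List Char) :
    popLines (xs ++ [b]) =
      (if PySem.Chars.strip b = [] ∨ PySem.Chars.strip b = ['-', '-', '-']
        then popLines xs else xs ++ [b]) := by
  rw [popLines]
  split
  · rename_i h
    rw [List.getLast?_concat] at h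
    cases h
  · rename_i l h
    rw [List.getLast?_concat] at h
    injection h with h
    subst h
    rw [List.dropLast_concat]

-- MAIN LEMMA: the backwards index scan keeps exactly the prefix that A's
-- split + pop loop keeps, and keeps something iff A keeps a line.
theorem main_clean_nil :
    List.take (cleanIdx ([] : List Char) ([] : List Char).length) ([] : List Char)
        = [('\n' : Char)].intercalate (popLines (splitC '\n' ([] : List Char)))
      ∧ (0 < cleanIdx ([] : List Char) ([] : List Char).length
          ↔ popLines (splitC '\n' ([] : List Char)) ≠ []) := by
  have hc : PySem.Chars.strip ([] : List Char) = []
      ∨ PySem.Chars.strip ([] : List Char) = ['-', '-', '-'] := Or.inl rfl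
  rw [show splitC '\n' ([] : List Char) = [] ++ [[]] from rfl, popLines_concat,
    if_pos hc, popLines_nil]
  simp [cleanIdx, List.intercalate]

theorem main_clean_aux (n : Nat) : ∀ (s : List Char), s.length ≤ n →
    List.take (cleanIdx s s.length) s
        = [('\n' : Char)].intercalate (popLines (splitC '\n' s))
      ∧ (0 < cleanIdx s s.length ↔ popLines (splitC '\n' s) ≠ []) := by
  induction n with
  | zero =>
    intro s hs
    have h0 : s = [] := by cases s <;> simp_all
    subst h0
    exact main_clean_nil
  | succ n ih =>
    intro s hs
    cases hsl : s.length with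
    | zero =>
      have h0 : s = [] := by cases s <;> simp_all
      subst h0
      exact main_clean_nil
    | succ m =>
      rw [cleanIdx]
      set k := lineStart s (m + 1) with hkdef
      have hk : k ≤ m + 1 := lineStart_le s (m + 1)
      have hline : PySem.List.slice s (some ((k : Nat) : Int)) (some ((m + 1 : Nat) : Int))
          = s.drop k := by
        rw [PySem.List.slice_natCast]
        have hdl : (s.drop k).length = m + 1 - k := by simp [hsl]
        rw [← hdl, List.take_length]
      rw [hline]
      by_cases hk0 : k = 0
      · -- no newline anywhere in s: one single line
        have hnonl : ('\n' : Char) ∉ s := by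
          intro hmem
          obtain ⟨j, hj, hje⟩ := List.mem_iff_getElem.mp hmem
          exact lineStart_no_nl s (m + 1) j (by omega) (by omega)
            (by rw [List.getD_eq_getElem s ' ' (by omega)]; exact hje)
        have hsplit : splitC '\n' s = [s] := splitC_no_sep _ _ hnonl
        have hdrop : s.drop k = s := by rw [hk0]; simp
        rw [hsplit, hdrop, show [s] = [] ++ [s] from rfl, popLines_concat]
        by_cases hcond : PySem.Chars.strip s = [] ∨ PySem.Chars.strip s = ['-', '-', '-']
        · rw [if_pos hcond, if_pos hcond, popLines_nil, hk0]
          simp [cleanIdx, List.intercalate]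
        · rw [if_neg hcond, if_neg hcond]
          refine ⟨?_, by simp⟩
          rw [← hsl, List.take_length]
          simp [List.intercalate]
      · -- s = a ++ '\n' :: b with b the last line
        have hnl : s.getD (k - 1) ' ' = '\n' := lineStart_prev_nl s (m + 1) (by omega)
        have hklen : k - 1 < s.length := by omega
        have hsab : s = s.take (k - 1) ++ '\n' :: s.drop k := by
          have h1 : s.drop (k - 1) = s[k - 1] :: s.drop (k - 1 + 1) :=
            List.drop_eq_getElem_cons hklen
          have h2 : s[k - 1] = '\n' := by
            rw [← List.getD_eq_getElem s ' ' hklen]; exact hnl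
          conv_lhs => rw [← List.take_append_drop (k - 1) s]
          rw [h1, h2, show k - 1 + 1 = k from by omega]
        have hbnl : ('\n' : Char) ∉ s.drop k := by
          intro hmem
          obtain ⟨j, hj, hje⟩ := List.mem_iff_getElem.mp hmem
          have hjlen : (s.drop k).length = m + 1 - k := by simp [hsl]
          refine lineStart_no_nl s (m + 1) (k + j) (by omega) (by omega) ?_
          rw [List.getD_eq_getElem s ' ' (by omega)]
          rw [List.getElem_drop] at hje
          exact hje
        have hsplit : splitC '\n' s = splitC '\n' (s.take (k - 1)) ++ [s.drop k] := by
          conv_lhs => rw [hsab]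
          exact splitC_append_last _ _ _ hbnl
        have halen : (s.take (k - 1)).length = k - 1 := by
          simp [hsl]; omega
        rw [hsplit, popLines_concat]
        by_cases hcond : PySem.Chars.strip (s.drop k) = []
            ∨ PySem.Chars.strip (s.drop k) = ['-', '-', '-']
        · rw [if_pos hcond, if_pos hcond]
          have hpre : cleanIdx s (k - 1) = cleanIdx (s.take (k - 1)) (k - 1) := by
            have h := cleanIdx_prefix (s.take (k - 1)) ('\n' :: s.drop k) (k - 1) (by omega)
            rw [← hsab] at h
            exact h
          obtain ⟨ih1, ih2⟩ := ih (s.take (k - 1)) (by omega)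
          rw [halen] at ih1 ih2
          refine ⟨?_, by rw [hpre]; exact ih2⟩
          have hle : cleanIdx (s.take (k - 1)) (k - 1) ≤ k - 1 := cleanIdx_le _ _
          rw [hpre, ← ih1, List.take_take, Nat.min_eq_left hle]
        · rw [if_neg hcond, if_neg hcond]
          refine ⟨?_, by simp⟩
          rw [← hsl, List.take_length, ← hsplit, intercalate_splitC]

theorem fold_eq (parts : List String) (acc : List (List Char)) :
    parts.foldl (fun acc part =>
      let lines := PySem.Chars.splitOn (PySem.Chars.rstrip part.toList) ['\n']
      let lines := popLines lines
      if lines ≠ [] then acc ++ [PySem.Chars.join ['\n'] lines] else acc) acc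
    = parts.foldl (fun acc part =>
      let s := PySem.Chars.rstrip part.toList
      let i := cleanIdx s s.length
      if 0 < i then acc ++ [PySem.List.slice s none (some (i : Int))] else acc) acc := by
  induction parts generalizing acc with
  | nil => rfl
  | cons p ps ih =>
    rw [List.foldl_cons, List.foldl_cons]
    have hstep : (let lines := PySem.Chars.splitOn (PySem.Chars.rstrip p.toList) ['\n']
        let lines := popLines lines
        if lines ≠ [] then acc ++ [PySem.Chars.join ['\n'] lines] else acc)
        = (let s := PySem.Chars.rstrip p.toList
           let i := cleanIdx s s.length
           if 0 < i then acc ++ [PySem.List.slice s none (some (i : Int))] else acc) := by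
      set s := PySem.Chars.rstrip p.toList with hs
      obtain ⟨h1, h2⟩ := main_clean_aux s.length s le_rfl
      simp only [splitOn_char]
      have hslice : PySem.List.slice s none (some ((cleanIdx s s.length : Nat) : Int))
          = s.take (cleanIdx s s.length) := by
        rw [PySem.List.slice_to s (Int.natCast_nonneg _)]
        simp
      by_cases hc : popLines (splitC '\n' s) = []
      · rw [if_neg (fun hne => hne hc), if_neg (fun hpos => h2.mp hpos hc)]
      · rw [if_pos (by simpa using hc), if_pos (h2.mpr hc), hslice, h1]
        rfl
    rw [hstep, ih]

-- ===== VERDICT (by name: the statement is the Claim_ definition above) =====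
theorem join_head_parts_spec : Claim_equal_join_head_parts := by
  intro parts _
  unfold Spec_join_head_parts join_head_parts join_head_parts_alt
  rw [fold_eq]
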